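-- pv_equiv track=rewrite | github.com/Bigdata-com/bigdata-cookbook | Credit_Ratings_Monitor/src/summary_generator.py | split_text_on_nearest_linebreak
-- ===== SOURCE A (Python) =====
-- def split_text_on_nearest_linebreak(text_string, num_splits):
--     """Splits the text string into `num_splits` parts, with each split occurring at the nearest line break.
--     Also appends the start and last part of string1 to string2 for context."""
--
--     split_texts = [text_string]
--
--     for _ in range(num_splits - 1):  # We split num_splits - 1 times, the last one is automatic
--         new_splits = []
--         for text in split_texts:
--             mid_index = len(text) // 2
--
--             # Find the closest line break before or after the midpoint
--             before_split = text.rfind('\n', 0, mid_index)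
--             after_split = text.find('\n', mid_index)
--
--             # Choose the closest split point, favoring the one before the midpoint
--             if before_split != -1:
--                 split_index = before_split
--             elif after_split != -1:
--                 split_index = after_split
--             else:
--                 # If no line break is found, split at the midpoint
--                 split_index = mid_index
--
--             # Split the string into two parts
--             string1 = text[:split_index]
--             string2 = text[split_index:]
--
--             # Take the start of string1 and append to the start of string2 (for context)
--             start_of_string1 = string1.split('\n')[:3]  # First 3 lines of string1
--             last_part_of_string1 = string1.split('\n')[-3:]  # Last 3 lines of string1
--
--             # Append both to string2 for continuity
--             string2 = '\n'.join(start_of_string1) + '\n'.join(last_part_of_string1) + '\n' + string2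
--
--             new_splits.extend([string1, string2])  # Add both parts to the new_splits list
--
--         split_texts = new_splits  # Update the split_texts with the newly split texts
--
--     return split_texts
-- ===== SOURCE B (Python) =====
-- def split_text_on_nearest_linebreak(text_string, num_splits):
--     """Same result as the iterative version, computed by top-down
--     divide-and-conquer recursion over the balanced split tree."""
--
--     def split(text, depth):
--         if depth <= 0:
--             return [text]
--         mid = len(text) // 2
--         idx = text.rfind('\n', 0, mid)
--         if idx == -1:
--             idx = text.find('\n', mid)
--             if idx == -1:
--                 idx = mid
--         s1 = text[:idx]
--         s2 = text[idx:]
--         lines = s1.split('\n')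
--         s2 = '\n'.join(lines[:3]) + '\n'.join(lines[-3:]) + '\n' + s2
--         return split(s1, depth - 1) + split(s2, depth - 1)
--
--     return split(text_string, num_splits - 1)
-- ===== Notes on version B (the rewrite author's own statement) =====
-- stated objective: alternative
-- what changed: Replaces A's level-by-level iterative doubling (outer range loop rebuilding the whole list each pass) with a top-down divide-and-conquer recursion split(text, depth) over the same balanced binary tree, with a single split('\n') call per node.
import Mathlib
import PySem

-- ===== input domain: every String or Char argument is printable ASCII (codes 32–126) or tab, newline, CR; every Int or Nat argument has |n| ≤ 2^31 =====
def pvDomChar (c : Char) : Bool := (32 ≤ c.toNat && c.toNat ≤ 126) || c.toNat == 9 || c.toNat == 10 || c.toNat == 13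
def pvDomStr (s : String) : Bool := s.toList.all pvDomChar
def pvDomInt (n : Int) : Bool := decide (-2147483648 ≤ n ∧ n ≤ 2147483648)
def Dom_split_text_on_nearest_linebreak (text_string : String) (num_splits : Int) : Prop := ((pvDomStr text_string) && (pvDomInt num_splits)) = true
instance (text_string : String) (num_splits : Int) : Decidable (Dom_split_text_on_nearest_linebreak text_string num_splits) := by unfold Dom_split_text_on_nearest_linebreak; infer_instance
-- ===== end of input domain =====

-- B replaces A's level-by-level iterative doubling by a top-down divide-and-conquer
-- recursion over the same balanced split tree (objective: alternative decomposition).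

-- ===== PORT A =====
-- body of A's inner 'for text in split_texts' loop: one text -> [string1, string2]
def pvStepA (text : String) : List String :=
  let mid_index : Int := PySem.Int.floordiv (PySem.Str.len text) 2
  let before_split : Int := PySem.Str.rfindFrom text "\n" 0 (some mid_index)
  let after_split : Int := PySem.Str.findFrom text "\n" mid_index none
  let split_index : Int :=
    if before_split ≠ -1 then before_split
    else if after_split ≠ -1 then after_split
    else mid_index
  let string1 : String := PySem.Str.slice text none (some split_index)
  let string2 : String := PySem.Str.slice text (some split_index) none
  let start_of_string1 := PySem.List.slice ((PySem.Str.split? string1 "\n").getD []) none (some 3)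
  let last_part_of_string1 := PySem.List.slice ((PySem.Str.split? string1 "\n").getD []) (some (-3)) none
  let string2 : String :=
    PySem.Str.join "\n" start_of_string1 ++ PySem.Str.join "\n" last_part_of_string1 ++ "\n" ++ string2
  [string1, string2]

def split_text_on_nearest_linebreak (text_string : String) (num_splits : Int) : List String :=
  (PySem.List.pyRange 0 (num_splits - 1) 1).foldl
    (fun split_texts _ =>
      split_texts.foldl (fun new_splits text => new_splits ++ pvStepA text) [])
    [text_string]

-- ===== PORT B =====
-- Source B's recursive helper 'split(text, depth)'; the Int depth num_splits-1 enters as its toNat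
def pvSplitRec (text : String) : Nat → List String
  | 0 => [text]
  | Nat.succ d =>
    let mid : Int := PySem.Int.floordiv (PySem.Str.len text) 2
    let idx0 : Int := PySem.Str.rfindFrom text "\n" 0 (some mid)
    let idx : Int :=
      if idx0 = -1 then
        let idx1 : Int := PySem.Str.findFrom text "\n" mid none
        if idx1 = -1 then mid else idx1
      else idx0
    let s1 : String := PySem.Str.slice text none (some idx)
    let s2 : String := PySem.Str.slice text (some idx) none
    let lines := (PySem.Str.split? s1 "\n").getD []
    let s2 : String :=
      PySem.Str.join "\n" (PySem.List.slice lines none (some 3)) ++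
        PySem.Str.join "\n" (PySem.List.slice lines (some (-3)) none) ++ "\n" ++ s2
    pvSplitRec s1 d ++ pvSplitRec s2 d

def split_text_on_nearest_linebreak_alt (text_string : String) (num_splits : Int) : List String :=
  pvSplitRec text_string (num_splits - 1).toNat

-- ===== PRECONDITION & SPEC =====
def Spec_split_text_on_nearest_linebreak (text_string : String) (num_splits : Int) (out : List String) : Prop := out = split_text_on_nearest_linebreak_alt text_string num_splits
instance (text_string : String) (num_splits : Int) (out : List String) : Decidable (Spec_split_text_on_nearest_linebreak text_string num_splits out) := by unfold Spec_split_text_on_nearest_linebreak; infer_instance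

-- ===== CLAIM (what is proved, stated in full; the proofs are below) =====
def Claim_equal_split_text_on_nearest_linebreak : Prop := ∀ (text_string : String) (num_splits : Int), Dom_split_text_on_nearest_linebreak text_string num_splits → Spec_split_text_on_nearest_linebreak text_string num_splits (split_text_on_nearest_linebreak text_string num_splits)

-- ===== LEMMAS AND PROOFS =====

-- the two children produced by one split, as B computes them
def pvChild1 (text : String) : String :=
  let mid : Int := PySem.Int.floordiv (PySem.Str.len text) 2
  let idx0 : Int := PySem.Str.rfindFrom text "\n" 0 (some mid)
  let idx : Int :=
    if idx0 = -1 then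
      let idx1 : Int := PySem.Str.findFrom text "\n" mid none
      if idx1 = -1 then mid else idx1
    else idx0
  PySem.Str.slice text none (some idx)

def pvChild2 (text : String) : String :=
  let mid : Int := PySem.Int.floordiv (PySem.Str.len text) 2
  let idx0 : Int := PySem.Str.rfindFrom text "\n" 0 (some mid)
  let idx : Int :=
    if idx0 = -1 then
      let idx1 : Int := PySem.Str.findFrom text "\n" mid none
      if idx1 = -1 then mid else idx1
    else idx0
  let s1 : String := PySem.Str.slice text none (some idx)
  let lines := (PySem.Str.split? s1 "\n").getD []
  PySem.Str.join "\n" (PySem.List.slice lines none (some 3)) ++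
    PySem.Str.join "\n" (PySem.List.slice lines (some (-3)) none) ++ "\n" ++
    PySem.Str.slice text (some idx) none

theorem pvStepA_eq (t : String) : pvStepA t = [pvChild1 t, pvChild2 t] := by
  simp only [pvStepA, pvChild1, pvChild2]
  by_cases h0 : PySem.Str.rfindFrom t "\n" 0 (some (PySem.Int.floordiv (PySem.Str.len t) 2)) = -1 <;>
    by_cases h1 : PySem.Str.findFrom t "\n" (PySem.Int.floordiv (PySem.Str.len t) 2) none = -1 <;>
      simp

theorem pvSplitRec_succ (t : String) (d : Nat) :
    pvSplitRec t (d + 1) = pvSplitRec (pvChild1 t) d ++ pvSplitRec (pvChild2 t) d := rfl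

theorem pvFoldl_step (xs : List String) (ys : List String) :
    xs.foldl (fun new_splits text => new_splits ++ pvStepA text) ys = ys ++ xs.flatMap pvStepA := by
  induction xs generalizing ys with
  | nil => simp
  | cons x xs ih => simp [List.foldl_cons, ih]

theorem pvMain (l : List Int) (xs : List String) :
    l.foldl (fun split_texts _ =>
        split_texts.foldl (fun new_splits text => new_splits ++ pvStepA text) []) xs
      = xs.flatMap (fun t => pvSplitRec t l.length) := by
  induction l generalizing xs with
  | nil => simp [pvSplitRec]
  | cons a l ih =>
    rw [List.foldl_cons, ih, pvFoldl_step, List.nil_append, List.flatMap_assoc]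
    refine List.flatMap_congr (fun t _ => ?_)
    rw [pvStepA_eq]
    simp [List.length_cons, pvSplitRec_succ]

-- ===== VERDICT (by name: the statement is the Claim_ definition above) =====
theorem split_text_on_nearest_linebreak_spec : Claim_equal_split_text_on_nearest_linebreak := by
  intro text_string num_splits _
  unfold Spec_split_text_on_nearest_linebreak split_text_on_nearest_linebreak
    split_text_on_nearest_linebreak_alt
  rw [pvMain]
  simp [PySem.List.length_pyRange_one]
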